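-- pv_equiv track=rewrite | github.com/engineervix/readme-coverage-badger | readme_coverage_badger/__main__.py | get_colour
-- ===== SOURCE A (Python) =====
-- COLOUR_RANGES = [
--     (95, "brightgreen"),
--     (90, "green"),
--     (75, "yellowgreen"),
--     (60, "yellow"),
--     (40, "orange"),
--     (0, "red"),
-- ]
--
-- def get_colour(total):
--     """Return colour for current coverage percent
--     Args:
--         total:
--             total coverage (str).
--     """
--     try:
--         xtotal = int(total)
--     except ValueError:
--         return "lightgrey"
--     for range_, colour in COLOUR_RANGES:
--         if xtotal >= range_:
--             return colour
-- ===== SOURCE B (Python) =====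
-- CUTOFFS = [0, 40, 60, 75, 90, 95]
-- COLOURS = ["red", "orange", "yellow", "yellowgreen", "green", "brightgreen"]
--
-- def _bisect_right(xs, x, lo, hi):
--     while lo < hi:
--         mid = (lo + hi) // 2
--         if x < xs[mid]:
--             hi = mid
--         else:
--             lo = mid + 1
--     return lo
--
-- def get_colour(total):
--     """Return colour for current coverage percent (total: str)."""
--     try:
--         xtotal = int(total)
--     except ValueError:
--         return "lightgrey"
--     idx = _bisect_right(CUTOFFS, xtotal, 0, len(CUTOFFS)) - 1
--     if idx < 0:
--         return None
--     return COLOURS[idx]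
-- ===== Notes on version B (the rewrite author's own statement) =====
-- stated objective: alternative
-- what changed: Replaces A's sequential first-match scan over descending (threshold, colour) pairs with a hand-rolled bisect_right binary search over ascending cutoffs indexing a parallel colour table.
-- outside the precondition, e.g. on get_colour('-1'): A returns None, B returns None
import Mathlib
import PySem

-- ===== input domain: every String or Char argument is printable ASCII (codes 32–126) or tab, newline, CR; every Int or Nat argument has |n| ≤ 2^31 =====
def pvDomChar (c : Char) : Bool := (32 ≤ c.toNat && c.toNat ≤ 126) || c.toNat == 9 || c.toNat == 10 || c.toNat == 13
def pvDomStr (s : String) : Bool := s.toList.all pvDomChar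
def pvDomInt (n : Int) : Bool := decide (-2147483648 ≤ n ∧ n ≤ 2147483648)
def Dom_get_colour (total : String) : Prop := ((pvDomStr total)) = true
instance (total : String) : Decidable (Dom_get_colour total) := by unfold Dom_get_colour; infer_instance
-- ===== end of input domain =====

-- B replaces A's sequential first-match scan over (threshold, colour) pairs by a
-- binary search (hand-rolled bisect_right) over ascending cutoffs with a parallel
-- colour table (objective: idiomatic/alternative; return value only).

-- ===== PORT A =====
def colourRanges : List (Int × String) :=
  [(95, "brightgreen"), (90, "green"), (75, "yellowgreen"), (60, "yellow"), (40, "orange"), (0, "red")]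

-- the 'for range_, colour in COLOUR_RANGES' loop; none = fell off the end (Python returns None)
def loopA (x : Int) : List (Int × String) → Option String
  | [] => none
  | (r, c) :: rest => if x ≥ r then some c else loopA x rest

def get_colour (total : String) : String :=
  match PySem.Int.ofStr? total with
  | none => "lightgrey"
  | some x => (loopA x colourRanges).getD ""   -- none (Python None) is outside Pre_; "" stands for it

-- ===== PORT B =====
def cutoffsB : List Int := [0, 40, 60, 75, 90, 95]
def coloursB : List String := ["red", "orange", "yellow", "yellowgreen", "green", "brightgreen"]

-- Source B's _bisect_right while-loop
def bisectRight (xs : List Int) (x : Int) (lo hi : Nat) : Nat :=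
  if _h : lo < hi then
    let mid := (lo + hi) / 2
    if x < xs.getD mid 0 then bisectRight xs x lo mid else bisectRight xs x (mid + 1) hi
  else lo
termination_by hi - lo
decreasing_by all_goals omega

def get_colour_alt (total : String) : String :=
  match PySem.Int.ofStr? total with
  | none => "lightgrey"
  | some x =>
    let idx : Int := (bisectRight cutoffsB x 0 cutoffsB.length : Int) - 1
    if idx < 0 then ""   -- Python None, outside Pre_
    else (coloursB.getD idx.toNat "")

-- ===== PRECONDITION & SPEC =====
-- Pre_ excludes strings parsing to a NEGATIVE int: there Python A falls off the loop and
-- returns None, which is not a value of the declared str return type (B does the same).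
def Pre_get_colour (total : String) : Prop :=
  0 ≤ (PySem.Int.ofStr? total).getD 0
instance (total : String) : Decidable (Pre_get_colour total) := by unfold Pre_get_colour; infer_instance

def pvWitness_get_colour : String := "87"

def Spec_get_colour (total : String) (out : String) : Prop := out = get_colour_alt total
instance (total : String) (out : String) : Decidable (Spec_get_colour total out) := by unfold Spec_get_colour; infer_instance

-- ===== CLAIM (what is proved, stated in full; the proofs are below) =====
def Claim_equal_get_colour : Prop := ∀ (total : String), Dom_get_colour total → Pre_get_colour total → Spec_get_colour total (get_colour total)

-- ===== LEMMAS AND PROOFS =====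

lemma bisect_eval (x : Int) (hx : 0 ≤ x) :
    bisectRight cutoffsB x 0 6 =
      if x < 40 then 1 else if x < 60 then 2 else if x < 75 then 3
      else if x < 90 then 4 else if x < 95 then 5 else 6 := by
  have h0 : ¬ x < 0 := by omega
  by_cases h40 : x < 40 <;> by_cases h60 : x < 60 <;> by_cases h75 : x < 75 <;>
    by_cases h90 : x < 90 <;> by_cases h95 : x < 95 <;>
    first
      | omega
      | (simp_all [bisectRight, cutoffsB]; try (split_ifs <;> omega))

lemma core_eq (x : Int) (hx : 0 ≤ x) :
    (loopA x colourRanges).getD "" =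
      (if ((bisectRight cutoffsB x 0 cutoffsB.length : Int) - 1) < 0 then ""
       else coloursB.getD (((bisectRight cutoffsB x 0 cutoffsB.length : Int) - 1)).toNat "") := by
  have h := bisect_eval x hx
  have hlen : cutoffsB.length = 6 := by decide
  rw [hlen, h]
  by_cases h40 : x < 40 <;> by_cases h60 : x < 60 <;> by_cases h75 : x < 75 <;>
    by_cases h90 : x < 90 <;> by_cases h95 : x < 95 <;>
    first
      | omega
      | (simp_all [loopA, colourRanges, coloursB]; try (split_ifs <;> first | rfl | omega))

-- ===== VERDICT (by name: the statement is the Claim_ definition above) =====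
theorem get_colour_spec : Claim_equal_get_colour := by
  intro total _ hpre
  unfold Spec_get_colour get_colour get_colour_alt
  unfold Pre_get_colour at hpre
  cases h : PySem.Int.ofStr? total with
  | none => simp
  | some x =>
    rw [h] at hpre
    simp only []
    exact core_eq x hpre
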